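-- pv_equiv track=rewrite | github.com/LucaAngioloni/Micchinetta | Bot.py | correct_multiple_prod
-- ===== SOURCE A (Python) =====
-- def correct_multiple_prod(list_of_subphrase):
--     """
--     Method to set the user name
--
--     Args:
--         name     the user name
--     """
--     # corregge casi come ['voglio 1 acqua 1 coca-cola'] -> ['voglio 1 acqua', '1 coca-cola']
--     new_list = []
--     final_list = []
--     for phrase in list_of_subphrase:
--         in_list = []
--         count = 0
--         splitted_phrase = phrase.split()
--         splitted_phrase.extend('1')
--         for idx, word in enumerate(splitted_phrase):
--             if word.isdigit():
--                 count+=1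
--                 if count>1:
--                     length = sum(len(x) for x in in_list)
--                     in_list.append(phrase.split()[length:idx])
--         new_list.extend(in_list)
--     for element in new_list:
--         sub_phrase = ' '.join(element)
--         final_list.append(sub_phrase)
--     return final_list
-- ===== SOURCE B (Python) =====
-- def correct_multiple_prod(list_of_subphrase):
--     final_list = []
--     for phrase in list_of_subphrase:
--         words = phrase.split()
--         seen_digit = False
--         start = 0
--         for i, w in enumerate(words):
--             if w.isdigit():
--                 if seen_digit:
--                     final_list.append(' '.join(words[start:i]))
--                     start = i
--                 else:
--                     seen_digit = True
--         if seen_digit: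
--             final_list.append(' '.join(words[start:]))
--     return final_list
-- ===== Notes on version B (the rewrite author's own statement) =====
-- stated objective: faster
-- what changed: B splits each phrase once and emits joined segments in a single pass, tracking the current segment's start index incrementally, instead of A's re-splitting the phrase and re-summing all accumulated segment lengths at every cut and joining in a second loop.
import Mathlib
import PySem

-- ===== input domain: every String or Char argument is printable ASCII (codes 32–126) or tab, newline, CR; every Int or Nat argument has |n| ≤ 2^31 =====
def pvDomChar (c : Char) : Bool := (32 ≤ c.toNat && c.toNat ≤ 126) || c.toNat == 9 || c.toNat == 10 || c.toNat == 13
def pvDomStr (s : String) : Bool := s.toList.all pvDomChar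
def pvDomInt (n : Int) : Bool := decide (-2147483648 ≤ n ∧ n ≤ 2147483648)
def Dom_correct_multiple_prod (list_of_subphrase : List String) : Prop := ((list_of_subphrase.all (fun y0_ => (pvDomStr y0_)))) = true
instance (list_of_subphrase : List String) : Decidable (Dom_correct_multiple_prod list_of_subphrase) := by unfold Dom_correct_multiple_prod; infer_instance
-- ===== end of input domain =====

-- B replaces A's quadratic inner bookkeeping (re-splitting the phrase and re-summing segment
-- lengths at every cut) by a single pass that splits once and tracks the segment start index;
-- objective: faster (per-phrase O(n) instead of O(n^2)).

-- ===== PORT A =====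
-- transliteration of A; '.extend('1')' iterates the string '1', appending the one-char word "1"
def correct_multiple_prod (list_of_subphrase : List String) : List String :=
  let new_list : List (List String) :=
    list_of_subphrase.foldl (fun new_list phrase =>
      let splitted_phrase := PySem.Str.split₀ phrase ++ ["1"]
      let st := (PySem.List.enumerate splitted_phrase).foldl
        (fun (st : List (List String) × Int) p =>
          if PySem.Str.strIsdigit p.2 then
            let count := st.2 + 1
            if count > 1 then
              let length : Int := st.1.foldl (fun a x => a + (x.length : Int)) 0
              (st.1 ++ [PySem.List.slice (PySem.Str.split₀ phrase) (some length) (some p.1)], count)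
            else (st.1, count)
          else st) ([], 0)
      new_list ++ st.1) []
  new_list.foldl (fun final_list element => final_list ++ [PySem.Str.join " " element]) []

-- ===== PORT B =====
def correct_multiple_prod_alt (list_of_subphrase : List String) : List String :=
  list_of_subphrase.foldl (fun final_list phrase =>
    let words := PySem.Str.split₀ phrase
    let st := (PySem.List.enumerate words).foldl
      (fun (st : Bool × Int × List String) p =>
        if PySem.Str.strIsdigit p.2 then
          if st.1 then
            (true, p.1, st.2.2 ++ [PySem.Str.join " " (PySem.List.slice words (some st.2.1) (some p.1))])
          else (true, st.2.1, st.2.2)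
        else st) (false, 0, final_list)
    if st.1 then st.2.2 ++ [PySem.Str.join " " (PySem.List.slice words (some st.2.1) none)] else st.2.2) []

-- ===== PRECONDITION & SPEC =====
def Spec_correct_multiple_prod (list_of_subphrase : List String) (out : List String) : Prop := out = correct_multiple_prod_alt list_of_subphrase
instance (list_of_subphrase : List String) (out : List String) : Decidable (Spec_correct_multiple_prod list_of_subphrase out) := by unfold Spec_correct_multiple_prod; infer_instance

-- ===== CLAIM (what is proved, stated in full; the proofs are below) =====
def Claim_equal_correct_multiple_prod : Prop := ∀ (list_of_subphrase : List String), Dom_correct_multiple_prod list_of_subphrase → Spec_correct_multiple_prod list_of_subphrase (correct_multiple_prod list_of_subphrase)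

-- ===== LEMMAS AND PROOFS =====

-- total word count of the accumulated segments (the value A recomputes with its inner sum)
def pvS (il : List (List String)) : Int := (il.map (fun x => (x.length : Int))).sum

lemma pvS_nonneg (il : List (List String)) : 0 ≤ pvS il := by
  induction il with
  | nil => simp [pvS]
  | cons x t ih => simp [pvS] at ih ⊢; positivity

lemma pvS_append (il : List (List String)) (x : List String) :
    pvS (il ++ [x]) = pvS il + (x.length : Int) := by
  simp [pvS]

-- length of the slice A appends, when the bounds are in range
lemma pv_len_slice (words : List String) (st k : Int) (h0 : 0 ≤ st) (hsk : st ≤ k)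
    (hk : k ≤ (words.length : Int)) :
    ((PySem.List.slice words (some st) (some k)).length : Int) = k - st := by
  rw [PySem.List.length_slice]
  simp only [PySem.List.clampIdx]
  split_ifs <;> omega

-- the inner-loop invariant: A's (in_list, count) determines B's (seen, start, out)
lemma pv_inner (words : List String) (ws : List String) :
    ∀ (k : Int) (il : List (List String)) (c : Int) (acc : List String),
    0 ≤ c → (c = 0 → il = []) → pvS il ≤ k → k + (ws.length : Int) ≤ (words.length : Int) →
    (PySem.List.enumerate ws k).foldl
      (fun (st : Bool × Int × List String) p =>
        if PySem.Str.strIsdigit p.2 then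
          if st.1 then
            (true, p.1, st.2.2 ++ [PySem.Str.join " " (PySem.List.slice words (some st.2.1) (some p.1))])
          else (true, st.2.1, st.2.2)
        else st) (decide (0 < c), pvS il, acc ++ il.map (PySem.Str.join " "))
    = (let ra := (PySem.List.enumerate ws k).foldl
        (fun (st : List (List String) × Int) p =>
          if PySem.Str.strIsdigit p.2 then
            let count := st.2 + 1
            if count > 1 then
              let length : Int := st.1.foldl (fun a x => a + (x.length : Int)) 0
              (st.1 ++ [PySem.List.slice words (some length) (some p.1)], count)
            else (st.1, count)
          else st) (il, c)
       (decide (0 < ra.2), pvS ra.1, acc ++ ra.1.map (PySem.Str.join " ")))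
    ∧ (let ra := (PySem.List.enumerate ws k).foldl
        (fun (st : List (List String) × Int) p =>
          if PySem.Str.strIsdigit p.2 then
            let count := st.2 + 1
            if count > 1 then
              let length : Int := st.1.foldl (fun a x => a + (x.length : Int)) 0
              (st.1 ++ [PySem.List.slice words (some length) (some p.1)], count)
            else (st.1, count)
          else st) (il, c)
       c ≤ ra.2 ∧ (ra.2 = 0 → ra.1 = []) ∧ pvS ra.1 ≤ k + (ws.length : Int)) := by
  induction ws with
  | nil =>
    intro k il c acc hc h0 hS hk
    simp only [PySem.List.enumerate_nil, List.foldl_nil, List.length_nil, Nat.cast_zero, add_zero]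
    exact ⟨trivial, le_refl c, h0, hS⟩
  | cons w t ih =>
    intro k il c acc hc h0 hS hk
    rw [PySem.List.enumerate_cons]
    simp only [List.foldl_cons, List.length_cons] at hk ⊢
    by_cases hd : PySem.Str.strIsdigit w = true
    · simp only [hd, if_true]
      by_cases hcz : c = 0
      · subst hcz
        have hil : il = [] := h0 rfl
        subst hil
        have hS0 : pvS ([] : List (List String)) = 0 := rfl
        have hk0 : 0 ≤ k := le_trans (pvS_nonneg []) (by rw [hS0] at hS ⊢; exact hS)
        simp only [show (decide ((0:Int) < 0)) = false from rfl, Bool.false_eq_true, if_false]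
        simp only [zero_add, hS0, List.map_nil, List.append_nil]
        have H := ih (k+1) [] 1 acc (by omega) (by intro h; omega)
          (by rw [hS0]; omega) (by push_cast at hk ⊢; omega)
        rw [show (decide ((0:Int) < 1)) = true from rfl] at H
        simp only [hS0, List.map_nil, List.append_nil] at H
        obtain ⟨e1, e2, e3, e4⟩ := H
        refine ⟨e1, le_trans zero_le_one e2, e3, ?_⟩
        push_cast at e4 ⊢
        omega
      · have hcpos : 0 < c := by omega
        simp only [hcpos, decide_true, if_true]
        have hgt : (c + 1 > 1) = True := by simp; omega
        simp only [hgt, if_true]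
        rw [PySem.List.foldl_add il (fun x => (x.length : Int)) 0]
        simp only [zero_add]
        have hsum : (il.map (fun x => (x.length : Int))).sum = pvS il := rfl
        rw [hsum]
        have hlen : ((PySem.List.slice words (some (pvS il)) (some k)).length : Int) = k - pvS il :=
          pv_len_slice words (pvS il) k (pvS_nonneg il) hS (by push_cast at hk; omega)
        have hS' : pvS (il ++ [PySem.List.slice words (some (pvS il)) (some k)]) = k := by
          rw [pvS_append, hlen]; omega
        have := ih (k+1) (il ++ [PySem.List.slice words (some (pvS il)) (some k)]) (c+1)
          acc (by omega) (by intro h; omega) (by rw [hS']; omega)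
          (by push_cast at hk ⊢; omega)
        have h1 : (decide ((0:Int) < c + 1)) = true := by simp; omega
        rw [hS'] at this
        simp only [h1, List.map_append, List.map_cons, List.map_nil, ← List.append_assoc] at this ⊢
        refine ⟨this.1, by omega, this.2.2.1, by have := this.2.2.2; push_cast at this ⊢; omega⟩
    · simp only [hd, if_false, Bool.false_eq_true]
      have := ih (k+1) il c acc hc h0 (by omega) (by push_cast at hk ⊢; omega)
      exact ⟨this.1, by have := this.2.1; omega, this.2.2.1,
        by have := this.2.2.2; push_cast at this ⊢; omega⟩

-- one phrase: B's loop body equals appending the joins of A's in_list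
lemma pv_phrase (phrase : String) (acc : List String) :
    (let words := PySem.Str.split₀ phrase
     let st := (PySem.List.enumerate words).foldl
       (fun (st : Bool × Int × List String) p =>
         if PySem.Str.strIsdigit p.2 then
           if st.1 then
             (true, p.1, st.2.2 ++ [PySem.Str.join " " (PySem.List.slice words (some st.2.1) (some p.1))])
           else (true, st.2.1, st.2.2)
         else st) (false, 0, acc)
     if st.1 then st.2.2 ++ [PySem.Str.join " " (PySem.List.slice words (some st.2.1) none)] else st.2.2)
    = acc ++ (((PySem.List.enumerate (PySem.Str.split₀ phrase ++ ["1"])).foldl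
        (fun (st : List (List String) × Int) p =>
          if PySem.Str.strIsdigit p.2 then
            let count := st.2 + 1
            if count > 1 then
              let length : Int := st.1.foldl (fun a x => a + (x.length : Int)) 0
              (st.1 ++ [PySem.List.slice (PySem.Str.split₀ phrase) (some length) (some p.1)], count)
            else (st.1, count)
          else st) ([], 0)).1.map (PySem.Str.join " ")) := by
  obtain ⟨hB, hc, hnil, hSle⟩ := pv_inner (PySem.Str.split₀ phrase) (PySem.Str.split₀ phrase) 0 [] 0 acc
    (le_refl 0) (fun _ => rfl) (le_of_eq rfl) (by simp)
  simp only [show (decide ((0:Int) < 0)) = false from rfl,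
    show pvS ([] : List (List String)) = 0 from rfl, List.map_nil, List.append_nil] at hB
  simp only [PySem.List.enumerate_append, List.foldl_append, PySem.List.enumerate_cons,
    PySem.List.enumerate_nil, List.foldl_cons, List.foldl_nil, zero_add]
  rw [hB]
  generalize hE : (PySem.List.enumerate (PySem.Str.split₀ phrase)).foldl
      (fun (st : List (List String) × Int) p =>
        if PySem.Str.strIsdigit p.2 then
          let count := st.2 + 1
          if count > 1 then
            let length : Int := st.1.foldl (fun a x => a + (x.length : Int)) 0
            (st.1 ++ [PySem.List.slice (PySem.Str.split₀ phrase) (some length) (some p.1)], count)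
          else (st.1, count)
        else st) ([], 0) = q at hc hnil hSle ⊢
  obtain ⟨ilA, cA⟩ := q
  have hd1 : PySem.Str.strIsdigit "1" = true := by decide
  simp only [hd1, if_true]
  by_cases hcz : cA = 0
  · subst hcz
    have : ilA = [] := hnil rfl
    subst this
    simp
  · have hpos : (0:Int) < cA := by omega
    simp only [hpos, decide_true, if_true, show cA + 1 > 1 ↔ True by constructor <;> intro h <;> [trivial; omega], if_true]
    rw [PySem.List.foldl_add ilA (fun x => (x.length : Int)) 0]
    simp only [zero_add]
    rw [show (List.map (fun x : List String => (x.length : Int)) ilA).sum = pvS ilA from rfl]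
    have hs := pvS_nonneg ilA
    rw [PySem.List.slice_from (PySem.Str.split₀ phrase) hs,
        PySem.List.slice_toNat (PySem.Str.split₀ phrase) hs (by positivity)]
    rw [List.take_of_length_le (by simp)]
    simp [pvS, List.map_append]

lemma pv_outer (l : List String) :
    ∀ (nl : List (List String)) (acc : List String),
    acc = nl.map (PySem.Str.join " ") →
    l.foldl (fun final_list phrase =>
      let words := PySem.Str.split₀ phrase
      let st := (PySem.List.enumerate words).foldl
        (fun (st : Bool × Int × List String) p =>
          if PySem.Str.strIsdigit p.2 then
            if st.1 then
              (true, p.1, st.2.2 ++ [PySem.Str.join " " (PySem.List.slice words (some st.2.1) (some p.1))])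
            else (true, st.2.1, st.2.2)
          else st) (false, 0, final_list)
      if st.1 then st.2.2 ++ [PySem.Str.join " " (PySem.List.slice words (some st.2.1) none)] else st.2.2) acc
    = (l.foldl (fun new_list phrase =>
        let splitted_phrase := PySem.Str.split₀ phrase ++ ["1"]
        let st := (PySem.List.enumerate splitted_phrase).foldl
          (fun (st : List (List String) × Int) p =>
            if PySem.Str.strIsdigit p.2 then
              let count := st.2 + 1
              if count > 1 then
                let length : Int := st.1.foldl (fun a x => a + (x.length : Int)) 0
                (st.1 ++ [PySem.List.slice (PySem.Str.split₀ phrase) (some length) (some p.1)], count)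
              else (st.1, count)
            else st) ([], 0)
        new_list ++ st.1) nl).map (PySem.Str.join " ") := by
  induction l with
  | nil => intro nl acc h; simpa using h
  | cons phrase t ih =>
    intro nl acc h
    simp only [List.foldl_cons]
    apply ih
    subst h
    rw [pv_phrase phrase]
    simp [List.map_append]

-- ===== VERDICT (by name: the statement is the Claim_ definition above) =====
theorem correct_multiple_prod_spec : Claim_equal_correct_multiple_prod := by
  intro l _
  unfold Spec_correct_multiple_prod correct_multiple_prod correct_multiple_prod_alt
  rw [PySem.List.foldl_append_singleton_eq_map]
  exact (pv_outer l [] [] rfl).symm
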